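-- pv_equiv track=rewrite | github.com/northumber/ComfyUI-northTools | nodes/from_dir_with_index_list.py | _parse_indices
-- ===== SOURCE A (Python) =====
-- def _parse_indices(indices_str, max_len):
--     indices = []
--     for idx in indices_str.split(","):
--         idx = idx.strip()
--         if idx.isdigit():
--             i = int(idx)
--             if 0 <= i < max_len:
--                 indices.append(i)
--     return sorted(set(indices))
-- ===== SOURCE B (Python) =====
-- def _parse_indices(indices_str, max_len):
--     # One pass: keep `result` sorted and duplicate-free by inserting each valid
--     # index at its position; no set and no final sort needed.
--     result = []
--     for tok in indices_str.split(","):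
--         tok = tok.strip()
--         if tok.isdigit():
--             i = int(tok)
--             if 0 <= i < max_len:
--                 pos = 0
--                 while pos < len(result) and result[pos] < i:
--                     pos += 1
--                 if pos == len(result) or result[pos] != i:
--                     result.insert(pos, i)
--     return result
-- ===== Notes on version B (the rewrite author's own statement) =====
-- stated objective: alternative
-- what changed: B drops the set and the final sorted() call: it maintains one sorted duplicate-free list, inserting each valid parsed index at its position in a single pass.
import Mathlib
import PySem

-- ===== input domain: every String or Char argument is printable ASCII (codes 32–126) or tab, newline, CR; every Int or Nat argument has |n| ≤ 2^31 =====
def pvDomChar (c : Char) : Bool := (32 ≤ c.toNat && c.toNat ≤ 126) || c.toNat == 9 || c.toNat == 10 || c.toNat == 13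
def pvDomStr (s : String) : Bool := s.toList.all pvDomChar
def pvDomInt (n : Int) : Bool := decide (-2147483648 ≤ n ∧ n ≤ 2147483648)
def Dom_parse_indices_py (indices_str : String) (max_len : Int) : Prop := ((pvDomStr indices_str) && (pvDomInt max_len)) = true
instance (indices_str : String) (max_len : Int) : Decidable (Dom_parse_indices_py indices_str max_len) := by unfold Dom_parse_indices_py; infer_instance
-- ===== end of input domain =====

-- B replaces A's set + sorted() by one pass keeping a sorted duplicate-free
-- accumulator, inserting each valid index at its position (alternative decomposition).

-- ===== PORT A =====
def parse_indices_py (indices_str : String) (max_len : Int) : List Int :=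
  let indices : List Int :=
    ((PySem.Str.split? indices_str ",").getD []).foldl (fun acc idx =>
      let idx := PySem.Str.strip idx
      if PySem.Str.strIsdigit idx then
        -- int(idx): ofStr? always returns some here (idx is a nonempty digit string)
        let i : Int := (PySem.Int.ofStr? idx).getD 0
        if 0 ≤ i ∧ i < max_len then acc ++ [i] else acc
      else acc) []
  PySem.List.sorted (PySem.Set.ofList indices) (fun x => x) false

-- ===== PORT B =====
-- the inner while/insert of Source B: insert i into the sorted list, skipping duplicates
def insUniq : List Int → Int → List Int
  | [], i => [i]
  | x :: xs, i =>
      if x < i then x :: insUniq xs i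
      else if x = i then x :: xs
      else i :: x :: xs

def parse_indices_py_alt (indices_str : String) (max_len : Int) : List Int :=
  ((PySem.Str.split? indices_str ",").getD []).foldl (fun acc tok =>
    let tok := PySem.Str.strip tok
    if PySem.Str.strIsdigit tok then
      let i : Int := (PySem.Int.ofStr? tok).getD 0
      if 0 ≤ i ∧ i < max_len then insUniq acc i else acc
    else acc) []

-- ===== PRECONDITION & SPEC =====
def Spec_parse_indices_py (indices_str : String) (max_len : Int) (out : List Int) : Prop := out = parse_indices_py_alt indices_str max_len
instance (indices_str : String) (max_len : Int) (out : List Int) : Decidable (Spec_parse_indices_py indices_str max_len out) := by unfold Spec_parse_indices_py; infer_instance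

-- ===== CLAIM (what is proved, stated in full; the proofs are below) =====
def Claim_equal_parse_indices_py : Prop := ∀ (indices_str : String) (max_len : Int), Dom_parse_indices_py indices_str max_len → Spec_parse_indices_py indices_str max_len (parse_indices_py indices_str max_len)

-- ===== LEMMAS AND PROOFS =====

-- the value (if any) one token contributes — the shared filter of both ports
def tokVal (max_len : Int) (tok : String) : Option Int :=
  let tok := PySem.Str.strip tok
  if PySem.Str.strIsdigit tok then
    let i : Int := (PySem.Int.ofStr? tok).getD 0
    if 0 ≤ i ∧ i < max_len then some i else none
  else none

lemma stepA_eq (m : Int) :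
    (fun (acc : List Int) (idx : String) =>
      let idx := PySem.Str.strip idx
      if PySem.Str.strIsdigit idx then
        let i : Int := (PySem.Int.ofStr? idx).getD 0
        if 0 ≤ i ∧ i < m then acc ++ [i] else acc
      else acc)
    = fun acc t => match tokVal m t with | some i => acc ++ [i] | none => acc := by
  funext acc t
  simp only [tokVal]
  split_ifs <;> rfl

lemma stepB_eq (m : Int) :
    (fun (acc : List Int) (tok : String) =>
      let tok := PySem.Str.strip tok
      if PySem.Str.strIsdigit tok then
        let i : Int := (PySem.Int.ofStr? tok).getD 0
        if 0 ≤ i ∧ i < m then insUniq acc i else acc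
      else acc)
    = fun acc t => match tokVal m t with | some i => insUniq acc i | none => acc := by
  funext acc t
  simp only [tokVal]
  split_ifs <;> rfl

lemma foldl_append_vals (m : Int) (ts : List String) (acc : List Int) :
    ts.foldl (fun acc t => match tokVal m t with | some i => acc ++ [i] | none => acc) acc
      = acc ++ ts.filterMap (tokVal m) := by
  induction ts generalizing acc with
  | nil => simp
  | cons t ts ih =>
      simp only [List.foldl_cons, List.filterMap_cons]
      cases tokVal m t <;> simp [ih]

lemma mem_insUniq (l : List Int) (i x : Int) : x ∈ insUniq l i ↔ x = i ∨ x ∈ l := by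
  induction l with
  | nil => simp [insUniq]
  | cons a l ih =>
      simp only [insUniq]
      split_ifs with h1 h2
      · simp only [List.mem_cons, ih]; tauto
      · subst h2; simp only [List.mem_cons]; tauto
      · simp only [List.mem_cons]

lemma pairwise_insUniq (l : List Int) (i : Int) (h : l.Pairwise (· < ·)) :
    (insUniq l i).Pairwise (· < ·) := by
  induction l with
  | nil => simp [insUniq]
  | cons a l ih =>
      rw [List.pairwise_cons] at h
      simp only [insUniq]
      split_ifs with h1 h2
      · refine List.pairwise_cons.2 ⟨?_, ih h.2⟩
        intro b hb
        rcases (mem_insUniq l i b).1 hb with rfl | hb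
        · exact h1
        · exact h.1 b hb
      · exact List.pairwise_cons.2 h
      · refine List.pairwise_cons.2 ⟨?_, List.pairwise_cons.2 h⟩
        intro b hb
        rcases List.mem_cons.1 hb with rfl | hb
        · omega
        · exact lt_trans (by omega) (h.1 b hb)

lemma foldl_insUniq_spec (m : Int) (ts : List String) (acc : List Int)
    (hacc : acc.Pairwise (· < ·)) :
    (ts.foldl (fun acc t => match tokVal m t with | some i => insUniq acc i | none => acc) acc).Pairwise (· < ·) ∧
    ∀ x, x ∈ ts.foldl (fun acc t => match tokVal m t with | some i => insUniq acc i | none => acc) acc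
       ↔ x ∈ acc ∨ x ∈ ts.filterMap (tokVal m) := by
  induction ts generalizing acc with
  | nil => simp [hacc]
  | cons t ts ih =>
      simp only [List.foldl_cons, List.filterMap_cons]
      cases h : tokVal m t with
      | none =>
          have := ih acc hacc
          exact ⟨this.1, fun x => this.2 x⟩
      | some i =>
          have := ih (insUniq acc i) (pairwise_insUniq _ _ hacc)
          refine ⟨this.1, fun x => ?_⟩
          rw [this.2 x, mem_insUniq]
          simp only [List.mem_cons]
          tauto

-- ===== VERDICT (by name: the statement is the Claim_ definition above) =====
theorem parse_indices_py_spec : Claim_equal_parse_indices_py := by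
  intro s m _
  unfold Spec_parse_indices_py parse_indices_py parse_indices_py_alt
  rw [stepA_eq m, stepB_eq m]
  set ts := (PySem.Str.split? s ",").getD [] with hts
  rw [foldl_append_vals m ts []]
  have hB := foldl_insUniq_spec m ts [] (by simp)
  set B := ts.foldl (fun acc t => match tokVal m t with | some i => insUniq acc i | none => acc) [] with hBdef
  have hpw : B.Pairwise (· < ·) := hB.1
  have hmem : ∀ x, x ∈ B ↔ x ∈ PySem.Set.ofList (ts.filterMap (tokVal m)) := by
    intro x
    rw [hB.2 x, PySem.Set.mem_ofList]
    simp
  have hnodupB : B.Nodup := hpw.nodup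
  have hperm : B.Perm (PySem.Set.ofList (ts.filterMap (tokVal m))) :=
    (List.perm_ext_iff_of_nodup hnodupB (PySem.Set.nodup_ofList _)).2 hmem
  exact PySem.List.sorted_eq_of_perm_of_pairwise_lt _ _ (fun x => x) hperm hpw
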